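-- pv_equiv track=rewrite | github.com/Akash-Kadali/HIREX | backend/api/optimize.py | replace_resume_items
-- ===== SOURCE A (Python) =====
-- from typing import List, Tuple, Dict, Iterable, Optional, Set
--
-- def find_resume_items(block: str) -> List[Tuple[int,int,int,int]]:
--     out = []
--     i = 0
--     needle = r"\resumeItem{"
--     while True:
--         i = block.find(needle, i)
--         if i < 0:
--             break
--         open_brace = i + len(r"\resumeItem")
--         if open_brace >= len(block) or block[open_brace] != "{":
--             i += 1
--             continue
--         depth, j = 0, open_brace
--         while j < len(block):
--             ch = block[j]
--             if ch == "{":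
--                 depth += 1
--             elif ch == "}":
--                 depth -= 1
--                 if depth == 0:
--                     close_b = j
--                     out.append((i, open_brace, close_b, close_b + 1))
--                     i = close_b + 1
--                     break
--             j += 1
--         else:
--             break
--     return out
--
-- def replace_resume_items(block: str, replacements: List[str]) -> str:
--     items = find_resume_items(block)
--     if not items:
--         return block
--     if len(replacements) < len(items):
--         replacements = replacements + [None] * (len(items) - len(replacements))
--     out, last = [], 0
--     for (start, open_b, close_b, end), newtxt in zip(items, replacements):
--         out.append(block[last:open_b + 1])
--         if newtxt is None:
--             out.append(block[open_b + 1:close_b])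
--         else:
--             out.append(newtxt)
--         out.append(block[close_b:end])
--         last = end
--     out.append(block[last:])
--     return "".join(out)
-- ===== SOURCE B (Python) =====
-- from typing import List, Optional
--
-- def replace_resume_items(block: str, replacements: List[Optional[str]]) -> str:
--     # Character-level state machine in one streaming pass: no str.find, no span
--     # list, no nested brace loop -- a persistent depth counter is the state.
--     NEEDLE = "\\resumeItem{"
--     out = []
--     last = 0        # start of text not yet emitted
--     k = 0           # replacement counter
--     depth = 0       # 0 = outside an item; >0 = inside, brace nesting depth
--     content = -1    # index of first content char of the current item
--     i = 0
--     n = len(block)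
--     while i < n:
--         if depth == 0:
--             if block.startswith(NEEDLE, i):
--                 depth = 1
--                 content = i + len(NEEDLE)
--                 i = content
--                 continue
--             i += 1
--         else:
--             c = block[i]
--             if c == "{":
--                 depth += 1
--             elif c == "}":
--                 depth -= 1
--                 if depth == 0:
--                     out.append(block[last:content])
--                     r = replacements[k] if k < len(replacements) else None
--                     out.append(block[content:i] if r is None else r)
--                     out.append("}")
--                     last = i + 1
--                     k += 1
--             i += 1
--     out.append(block[last:])
--     return "".join(out)
-- ===== Notes on version B (the rewrite author's own statement) =====
-- stated objective: alternative
-- what changed: B replaces A's pipeline (str.find for the needle, a nested balanced-brace matching loop collecting a list of item spans, None-padding, then a zip rebuild) with a single character-at-a-time state machine: one flat loop over the string whose persistent state (brace depth, content start, emit cursor, replacement counter) both recognises items and emits the output as it goes.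
import Mathlib
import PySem

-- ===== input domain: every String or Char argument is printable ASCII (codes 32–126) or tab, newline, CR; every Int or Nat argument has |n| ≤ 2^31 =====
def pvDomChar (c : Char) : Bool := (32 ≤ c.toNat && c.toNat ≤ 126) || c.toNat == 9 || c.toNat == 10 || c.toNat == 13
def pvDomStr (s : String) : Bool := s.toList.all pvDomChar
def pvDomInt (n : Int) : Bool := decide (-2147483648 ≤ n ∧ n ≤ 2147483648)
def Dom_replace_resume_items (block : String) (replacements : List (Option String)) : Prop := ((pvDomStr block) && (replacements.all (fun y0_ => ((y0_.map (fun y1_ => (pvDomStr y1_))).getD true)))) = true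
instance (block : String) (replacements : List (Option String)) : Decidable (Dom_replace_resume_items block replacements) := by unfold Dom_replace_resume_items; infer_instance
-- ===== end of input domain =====

set_option maxHeartbeats 1000000


-- B replaces A's pipeline (str.find, nested brace-matching loop collecting spans,
-- None-padding, zip rebuild) with a single character-level state-machine pass
-- (objective: alternative).

-- ===== PORT A =====

-- r"\resumeItem{" as a character list
def pvNeedle : List Char := ['\\', 'r', 'e', 's', 'u', 'm', 'e', 'I', 't', 'e', 'm', '{']

-- A's inner balanced-brace while loop; some c = break with close_b = c, none = ran off
-- the end (for-else).  'fuel' is only a totality guard: every call passes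
-- fuel = s.length - j, which never runs out before the j < len(block) test fails.
def pvBraceScan (s : List Char) (fuel j : Nat) (depth : Int) : Option Nat :=
  match fuel with
  | 0 => none
  | fuel + 1 =>
    if h : j < s.length then
      let ch := s[j]
      if ch = '{' then pvBraceScan s fuel (j + 1) (depth + 1)
      else if ch = '}' then
        if depth - 1 = 0 then some j else pvBraceScan s fuel (j + 1) (depth - 1)
      else pvBraceScan s fuel (j + 1) depth
    else none

-- port of find_resume_items.  'fuel' is only a totality guard: the top-level call passes
-- fuel = len(block) + 1 and the cursor i strictly increases while staying ≤ len(block) + 1.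
-- The 'i ≤ s.length' test is exact Python semantics: str.find with a start past
-- len(block) returns -1 (break).
def pvFindItems (s : List Char) (fuel i : Nat) : List (Nat × Nat × Nat × Nat) :=
  match fuel with
  | 0 => []
  | fuel + 1 =>
    if i ≤ s.length then
      let f := PySem.Chars.findFrom s pvNeedle (i : Int) none
      if f < 0 then []
      else
        let i' := f.toNat
        -- open_brace = i' + len(r"\resumeItem") = i' + 11
        if i' + 11 ≥ s.length ∨ PySem.List.pyGet? s ((i' + 11 : Nat) : Int) ≠ some '{' then
          pvFindItems s fuel (i' + 1)  -- i += 1; continue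
        else
          match pvBraceScan s (s.length - (i' + 11)) (i' + 11) 0 with
          | some cb => (i', i' + 11, cb, cb + 1) :: pvFindItems s fuel (cb + 1)
          | none => []
    else []

-- the rebuild loop of replace_resume_items: the out-list pieces, concatenated in order
def pvRebuildA (s : List Char) : List ((Nat × Nat × Nat × Nat) × Option String) → Nat → List Char
  | [], last => s.drop last  -- out.append(block[last:])
  | ((_, ob, cb, en), r) :: rest, last =>
      PySem.List.slice s (some (last : Int)) (some ((ob + 1 : Nat) : Int))
      ++ (match r with
          | none => PySem.List.slice s (some ((ob + 1 : Nat) : Int)) (some ((cb : Nat) : Int))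
          | some t => t.toList)
      ++ PySem.List.slice s (some ((cb : Nat) : Int)) (some ((en : Nat) : Int))
      ++ pvRebuildA s rest en

def replace_resume_items (block : String) (replacements : List (Option String)) : String :=
  let s := block.toList
  let items := pvFindItems s (s.length + 1) 0
  if items.isEmpty then block
  else
    let reps' := if replacements.length < items.length
      then replacements ++ List.replicate (items.length - replacements.length) none
      else replacements
    String.ofList (pvRebuildA s (items.zip reps') 0)

-- ===== PORT B =====

-- B's single while loop: one streaming pass, state = (emit cursor 'last', replacement
-- counter k, brace depth, content start).  'block.startswith(NEEDLE, i)' is exactly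
-- 'pvNeedle <+: s.drop i' for 0 ≤ i ≤ len(block).  'fuel' is only a totality guard:
-- the top-level call passes len(block) + 1 and i strictly increases each iteration.
def pvScanB (s : List Char) (reps : List (Option String)) (fuel i last k : Nat)
    (depth content : Int) : List Char :=
  match fuel with
  | 0 => s.drop last
  | fuel + 1 =>
    if h : i < s.length then
      if depth = 0 then
        if pvNeedle <+: s.drop i then
          pvScanB s reps fuel (i + 12) last k 1 ((i + 12 : Nat) : Int)
        else
          pvScanB s reps fuel (i + 1) last k 0 content
      else
        let c := s[i]
        if c = '{' then pvScanB s reps fuel (i + 1) last k (depth + 1) content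
        else if c = '}' then
          if depth - 1 = 0 then
            PySem.List.slice s (some (last : Int)) (some content)
            ++ (match (if _ : k < reps.length then reps[k] else none) with
                | none => PySem.List.slice s (some content) (some ((i : Nat) : Int))
                | some r => r.toList)
            ++ ['}']
            ++ pvScanB s reps fuel (i + 1) (i + 1) (k + 1) 0 content
          else pvScanB s reps fuel (i + 1) last k (depth - 1) content
        else pvScanB s reps fuel (i + 1) last k depth content
    else s.drop last  -- out.append(block[last:]) after the loop

def replace_resume_items_alt (block : String) (replacements : List (Option String)) : String :=
  String.ofList (pvScanB block.toList replacements (block.toList.length + 1) 0 0 0 0 (-1))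

-- ===== PRECONDITION & SPEC =====
def Spec_replace_resume_items (block : String) (replacements : List (Option String)) (out : String) : Prop := out = replace_resume_items_alt block replacements
instance (block : String) (replacements : List (Option String)) (out : String) : Decidable (Spec_replace_resume_items block replacements out) := by unfold Spec_replace_resume_items; infer_instance

-- ===== CLAIM (what is proved, stated in full; the proofs are below) =====
def Claim_equal_replace_resume_items : Prop := ∀ (block : String) (replacements : List (Option String)), Dom_replace_resume_items block replacements → Spec_replace_resume_items block replacements (replace_resume_items block replacements)

-- ===== LEMMAS AND PROOFS =====

theorem pvBraceScan_some {s : List Char} : ∀ {fuel j : Nat} {d : Int} {c : Nat},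
    pvBraceScan s fuel j d = some c → j ≤ c ∧ ∃ h : c < s.length, s[c] = '}' := by
  intro fuel
  induction fuel with
  | zero => intro j d c h; simp [pvBraceScan] at h
  | succ fuel ih =>
    intro j d c h
    rw [pvBraceScan] at h
    dsimp only at h
    by_cases hj : j < s.length
    · rw [dif_pos hj] at h
      by_cases hbrace : s[j] = '{'
      · rw [if_pos hbrace] at h; obtain ⟨h1, h2⟩ := ih h; exact ⟨by omega, h2⟩
      · rw [if_neg hbrace] at h
        by_cases hclose : s[j] = '}'
        · rw [if_pos hclose] at h
          by_cases hz : d - 1 = 0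
          · rw [if_pos hz] at h
            injection h with h
            subst h
            exact ⟨le_refl _, hj, hclose⟩
          · rw [if_neg hz] at h; obtain ⟨h1, h2⟩ := ih h; exact ⟨by omega, h2⟩
        · rw [if_neg hclose] at h; obtain ⟨h1, h2⟩ := ih h; exact ⟨by omega, h2⟩
    · rw [dif_neg hj] at h; cases h

theorem pvNeedle_len {s : List Char} {i : Nat} (h : pvNeedle <+: s.drop i) : i + 12 ≤ s.length := by
  obtain ⟨t, ht⟩ := h
  have := congrArg List.length ht
  simp [pvNeedle] at this
  omega

theorem pvNeedle_brace {s : List Char} {i : Nat} (h : pvNeedle <+: s.drop i) (h' : i + 11 < s.length) : s[i+11] = '{' := by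
  obtain ⟨t, ht⟩ := h
  have h3 : s[i+11]? = some '{' := by
    rw [show i + 11 = i + 11 from rfl, ← List.getElem?_drop, ← ht]
    rfl
  have h4 : s[i+11]? = some (s[i+11]'h') := List.getElem?_eq_getElem h'
  rw [h4] at h3
  exact Option.some.inj h3

theorem pvGetD_drop (reps : List (Option String)) (k : Nat) :
    (reps.drop k).getD 0 none = if _ : k < reps.length then reps[k] else none := by
  split
  · next h => simp [List.getD, List.getElem?_drop, List.getElem?_eq_getElem h]
  · next h => simp [List.getD, List.getElem?_drop, List.getElem?_eq_none_iff.mpr (by simpa using Nat.le_of_not_lt h)]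

-- A's padded replacement list, seen from position k
def pvPad (xs : List (Option String)) (n : Nat) : List (Option String) :=
  xs ++ List.replicate (n - xs.length) none

theorem pvPad_cons (xs : List (Option String)) (n : Nat) :
    pvPad xs (n + 1) = xs.getD 0 none :: pvPad (xs.drop 1) n := by
  cases xs with
  | nil => simp [pvPad, List.replicate_succ]
  | cons a t => simp [pvPad, Nat.succ_sub_succ]

theorem pvFindItems_succ (s : List Char) (fuel i : Nat) :
    pvFindItems s (fuel+1) i =
      (if i ≤ s.length then
        let f := PySem.Chars.findFrom s pvNeedle (i : Int) none
        if f < 0 then []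
        else
          let i' := f.toNat
          if i' + 11 ≥ s.length ∨ PySem.List.pyGet? s ((i' + 11 : Nat) : Int) ≠ some '{' then
            pvFindItems s fuel (i' + 1)
          else
            match pvBraceScan s (s.length - (i' + 11)) (i' + 11) 0 with
            | some cb => (i', i' + 11, cb, cb + 1) :: pvFindItems s fuel (cb + 1)
            | none => []
      else []) := rfl

theorem pvScanB_succ (s : List Char) (reps : List (Option String)) (fuel i last k : Nat)
    (depth content : Int) :
    pvScanB s reps (fuel+1) i last k depth content =
      (if h : i < s.length then
        if depth = 0 then
          if pvNeedle <+: s.drop i then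
            pvScanB s reps fuel (i + 12) last k 1 ((i + 12 : Nat) : Int)
          else
            pvScanB s reps fuel (i + 1) last k 0 content
        else
          let c := s[i]
          if c = '{' then pvScanB s reps fuel (i + 1) last k (depth + 1) content
          else if c = '}' then
            if depth - 1 = 0 then
              PySem.List.slice s (some (last : Int)) (some content)
              ++ (match (if _ : k < reps.length then reps[k] else none) with
                  | none => PySem.List.slice s (some content) (some ((i : Nat) : Int))
                  | some r => r.toList)
              ++ ['}']
              ++ pvScanB s reps fuel (i + 1) (i + 1) (k + 1) 0 content
            else pvScanB s reps fuel (i + 1) last k (depth - 1) content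
          else pvScanB s reps fuel (i + 1) last k depth content
      else s.drop last) := rfl

-- pvScanB does not depend on the fuel as long as it covers the remaining length
theorem pvScanB_fuel (s : List Char) (reps : List (Option String)) :
    ∀ f1 f2 i last k (d content : Int), s.length + 1 - i ≤ f1 → s.length + 1 - i ≤ f2 →
      pvScanB s reps f1 i last k d content = pvScanB s reps f2 i last k d content := by
  intro f1
  induction f1 with
  | zero =>
    intro f2 i last k d content h1 h2
    have hi : ¬ i < s.length := by omega
    cases f2 with
    | zero => rfl
    | succ f2 => rw [pvScanB_succ, dif_neg hi]; rfl
  | succ f1 ih =>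
    intro f2 i last k d content h1 h2
    cases f2 with
    | zero =>
      have hi : ¬ i < s.length := by omega
      rw [pvScanB_succ, dif_neg hi]; rfl
    | succ f2 =>
      rw [pvScanB_succ, pvScanB_succ]
      by_cases hi : i < s.length
      · rw [dif_pos hi, dif_pos hi]
        dsimp only
        by_cases hd : d = 0
        · rw [if_pos hd, if_pos hd]
          by_cases hp : pvNeedle <+: s.drop i
          · rw [if_pos hp, if_pos hp]
            exact ih f2 (i+12) last k 1 _ (by omega) (by omega)
          · rw [if_neg hp, if_neg hp]
            exact ih f2 (i+1) last k 0 content (by omega) (by omega)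
        · rw [if_neg hd, if_neg hd]
          by_cases hob : s[i] = '{'
          · rw [if_pos hob, if_pos hob]
            exact ih f2 (i+1) last k (d+1) content (by omega) (by omega)
          · rw [if_neg hob, if_neg hob]
            by_cases hcb : s[i] = '}'
            · rw [if_pos hcb, if_pos hcb]
              by_cases hz : d - 1 = 0
              · rw [if_pos hz, if_pos hz,
                  ih f2 (i+1) (i+1) (k+1) 0 content (by omega) (by omega)]
              · rw [if_neg hz, if_neg hz]
                exact ih f2 (i+1) last k (d-1) content (by omega) (by omega)
            · rw [if_neg hcb, if_neg hcb]
              exact ih f2 (i+1) last k d content (by omega) (by omega)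
      · rw [dif_neg hi, dif_neg hi]

-- while depth ≥ 1, B's loop performs exactly A's balanced-brace scan
theorem pvScanInside (s : List Char) (reps : List (Option String)) :
    ∀ F j last k (d content : Int), 1 ≤ d → j ≤ s.length → s.length + 1 - j = F →
      pvScanB s reps F j last k d content =
        (match pvBraceScan s (s.length - j) j d with
        | none => s.drop last
        | some c =>
            PySem.List.slice s (some (last : Int)) (some content)
            ++ (match (if _ : k < reps.length then reps[k] else none) with
                | none => PySem.List.slice s (some content) (some ((c : Nat) : Int))
                | some r => r.toList)
            ++ ['}']
            ++ pvScanB s reps (s.length - c) (c + 1) (c + 1) (k + 1) 0 content) := by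
  intro F
  induction F with
  | zero => intro j last k d content hd hj hF; omega
  | succ F ih =>
    intro j last k d content hd hj hF
    by_cases hjl : j < s.length
    · rw [pvScanB_succ, dif_pos hjl]
      dsimp only
      rw [if_neg (by omega : ¬ d = 0)]
      rw [show s.length - j = (s.length - (j+1)) + 1 from by omega]
      rw [pvBraceScan]
      dsimp only
      rw [dif_pos hjl]
      by_cases hob : s[j] = '{'
      · rw [if_pos hob, if_pos hob]
        exact ih (j+1) last k (d+1) content (by omega) (by omega) (by omega)
      · rw [if_neg hob, if_neg hob]
        by_cases hcb : s[j] = '}'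
        · rw [if_pos hcb, if_pos hcb]
          by_cases hz : d - 1 = 0
          · rw [if_pos hz, if_pos hz]
            rw [show F = s.length - j from by omega]
          · rw [if_neg hz, if_neg hz]
            exact ih (j+1) last k (d-1) content (by omega) (by omega) (by omega)
        · rw [if_neg hcb, if_neg hcb]
          exact ih (j+1) last k d content (by omega) (by omega) (by omega)
    · rw [pvScanB_succ, dif_neg hjl]
      rw [show s.length - j = 0 from by omega]
      rfl

-- if the needle occurs at i and nowhere in [last, i), find from last returns exactly i
theorem pvFindFrom_at (s : List Char) (last i : Nat) (hl : last ≤ i)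
    (hi : pvNeedle <+: s.drop i)
    (hnp : ∀ p, last ≤ p → p < i → ¬ pvNeedle <+: s.drop p) :
    PySem.Chars.findFrom s pvNeedle (last : Int) none = (i : Int) := by
  have h12 := pvNeedle_len hi
  have hlen : last ≤ s.length := by omega
  have hne : PySem.Chars.findFrom s pvNeedle (last : Int) none ≠ -1 := by
    intro h
    rw [PySem.Chars.findFrom_natCast_eq_neg_one_iff s pvNeedle last hlen] at h
    apply h
    have hsuf : s.drop i <:+ s.drop last := by
      have h0 : (s.drop last).drop (i - last) <:+ s.drop last := List.drop_suffix _ _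
      rwa [List.drop_drop, show last + (i - last) = i from by omega] at h0
    exact List.infix_iff_prefix_suffix.mpr ⟨s.drop i, hi, hsuf⟩
  obtain ⟨hge, hpre, hmin⟩ := PySem.Chars.findFrom_natCast_spec s pvNeedle last hlen hne
  have hge' : last ≤ (PySem.Chars.findFrom s pvNeedle (last : Int) none).toNat := by omega
  rcases lt_trichotomy (PySem.Chars.findFrom s pvNeedle (last : Int) none).toNat i with hlt | heq | hgt
  · exact absurd hpre (hnp _ hge' hlt)
  · rw [← heq]
    exact (Int.toNat_of_nonneg (by omega)).symm
  · exact absurd hi (hmin i hl hgt)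

-- if the needle occurs nowhere at or after last, find from last returns -1
theorem pvFindFrom_none (s : List Char) (last : Nat) (hlen : last ≤ s.length)
    (hnp : ∀ p, last ≤ p → ¬ pvNeedle <+: s.drop p) :
    PySem.Chars.findFrom s pvNeedle (last : Int) none = -1 := by
  rw [PySem.Chars.findFrom_natCast_eq_neg_one_iff s pvNeedle last hlen]
  intro hinf
  obtain ⟨t, hp, u, hu⟩ := List.infix_iff_prefix_suffix.mp hinf
  have ht : t = (s.drop last).drop u.length := by rw [← hu, List.drop_left]
  rw [List.drop_drop] at ht
  exact hnp (last + u.length) (by omega) (ht ▸ hp)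

theorem pvMainB (s : List Char) (reps : List (Option String)) :
    ∀ F i last k (content : Int) fuelA, last ≤ i → i ≤ s.length → s.length + 1 - i = F →
      s.length + 1 - last ≤ fuelA →
      (∀ p, last ≤ p → p < i → ¬ pvNeedle <+: s.drop p) →
      pvScanB s reps F i last k 0 content =
        pvRebuildA s ((pvFindItems s fuelA last).zip
          (pvPad (reps.drop k) (pvFindItems s fuelA last).length)) last := by
  intro F
  induction F using Nat.strong_induction_on with
  | _ F IH =>
    intro i last k content fuelA hli hin hF hfa hnp
    obtain ⟨fuelA', rfl⟩ : ∃ fa, fuelA = fa + 1 := ⟨fuelA - 1, by omega⟩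
    obtain ⟨F', rfl⟩ : ∃ F', F = F' + 1 := ⟨F - 1, by omega⟩
    rw [pvScanB_succ]
    by_cases hil : i < s.length
    · rw [dif_pos hil]
      dsimp only
      rw [if_pos rfl]
      by_cases hp : pvNeedle <+: s.drop i
      · rw [if_pos hp]
        have h12 := pvNeedle_len hp
        have hff := pvFindFrom_at s last i hli hp hnp
        rw [pvFindItems_succ]
        dsimp only
        rw [if_pos (by omega : last ≤ s.length), hff]
        rw [if_neg (by simp : ¬ ((i : Int) < 0)), Int.toNat_natCast]
        have hbr : s[i+11] = '{' := pvNeedle_brace hp (by omega)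
        have hcond : ¬ (i + 11 ≥ s.length ∨ PySem.List.pyGet? s ((i + 11 : Nat) : Int) ≠ some '{') := by
          rw [not_or, not_not]
          refine ⟨by omega, ?_⟩
          rw [PySem.List.pyGet?_natCast, List.getElem?_eq_getElem (by omega)]
          exact congrArg some hbr
        rw [if_neg hcond]
        have hbs : pvBraceScan s (s.length - (i + 11)) (i + 11) 0
            = pvBraceScan s (s.length - (i + 12)) (i + 12) 1 := by
          rw [show s.length - (i + 11) = (s.length - (i + 12)) + 1 from by omega]
          rw [pvBraceScan]
          dsimp only
          have hlt : i + 11 < s.length := by omega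
          rw [dif_pos hlt, if_pos (pvNeedle_brace hp hlt)]
          norm_num
        rw [hbs]
        rw [pvScanB_fuel s reps F' (s.length + 1 - (i + 12)) (i + 12) last k 1
          ((i + 12 : Nat) : Int) (by omega) (by omega)]
        rw [pvScanInside s reps (s.length + 1 - (i + 12)) (i + 12) last k 1
          ((i + 12 : Nat) : Int) (by omega) (by omega) rfl]
        cases hb : pvBraceScan s (s.length - (i + 12)) (i + 12) 1 with
        | none => simp [pvRebuildA]
        | some c =>
          obtain ⟨hjc, hcl, hcg⟩ := pvBraceScan_some hb
          simp only [List.length_cons, pvPad_cons, List.zip_cons_cons, pvRebuildA]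
          have e1 : i + 11 + 1 = i + 12 := by omega
          rw [e1, pvGetD_drop, List.drop_drop]
          have e2 : PySem.List.slice s (some (c : Int)) (some ((c + 1 : Nat) : Int)) = ['}'] := by
            rw [PySem.List.slice_natCast, List.drop_eq_getElem_cons hcl]
            simp [hcg]
          rw [e2]
          have e3 := IH (s.length - c) (by omega) (c + 1) (c + 1) (k + 1)
            ((i + 12 : Nat) : Int) fuelA' (by omega) (by omega) (by omega) (by omega)
            (fun p h1 h2 => absurd (lt_of_le_of_lt h1 h2) (lt_irrefl _))
          rw [show s.length - c = s.length + 1 - (c + 1) from by omega] at e3 ⊢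
          rw [e3]
      · rw [if_neg hp]
        exact IH F' (by omega) (i + 1) last k content (fuelA' + 1) (by omega) (by omega)
          (by omega) hfa
          (fun p h1 h2 => by
            rcases Nat.lt_or_ge p i with h | h
            · exact hnp p h1 h
            · exact (show p = i from by omega) ▸ hp)
    · rw [dif_neg hil]
      rw [pvFindItems_succ]
      dsimp only
      rw [if_pos (by omega : last ≤ s.length)]
      rw [pvFindFrom_none s last (by omega) (fun p hpl hpre => by
        have := pvNeedle_len hpre
        exact absurd hpre (hnp p hpl (by omega)))]
      rw [if_pos (by norm_num : (-1 : Int) < 0)]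
      rfl

theorem pvTop (block : String) (reps : List (Option String)) :
    replace_resume_items block reps = replace_resume_items_alt block reps := by
  unfold replace_resume_items replace_resume_items_alt
  dsimp only
  have hmain := pvMainB block.toList reps (block.toList.length + 1) 0 0 0 (-1)
    (block.toList.length + 1) (le_refl 0) (by omega) (by omega) (by omega)
    (fun p h1 h2 => absurd h2 (by omega))
  simp only [List.drop_zero] at hmain
  by_cases hi : pvFindItems block.toList (block.toList.length + 1) 0 = []
  · rw [hi] at hmain ⊢
    simp only [List.isEmpty_nil, if_true]
    rw [hmain]
    simp [pvRebuildA, String.ofList_toList]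
  · simp only [List.isEmpty_eq_false_iff.mpr hi, Bool.false_eq_true, if_false]
    congr 1
    rw [hmain]
    congr 2
    by_cases hl : reps.length < (pvFindItems block.toList (block.toList.length + 1) 0).length
    · simp only [if_pos hl, pvPad]
    · simp only [if_neg hl, pvPad, Nat.sub_eq_zero_of_le (Nat.le_of_not_lt hl), List.replicate_zero, List.append_nil]

-- ===== VERDICT (by name: the statement is the Claim_ definition above) =====
theorem replace_resume_items_spec : Claim_equal_replace_resume_items := by
  intro block reps _
  exact pvTop block reps
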